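-- pv_equiv track=rewrite | github.com/mjalas/aoc-2022 | python_solutions/6/solution.py | find_first_marker
-- ===== SOURCE A (Python) =====
-- def find_first_marker(input: str) -> int:
--     marker = []
--     counter = 0
--     for c in input:
--         counter += 1
--         marker.append(c)
--
--         if len(marker) == 4:
--             if len(set(marker)) == len(marker):
--                 return counter
--             marker.pop(0)
--     return 0
-- ===== SOURCE B (Python) =====
-- def find_first_marker(input: str) -> int:
--     start = 0
--     for i, c in enumerate(input):
--         k = input[start:i].find(c)
--         if k != -1:
--             start = start + k + 1
--         if i - start + 1 == 4:
--             return i + 1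
--     return 0
-- ===== Notes on version B (the rewrite author's own statement) =====
-- stated objective: alternative
-- what changed: B replaces A's rebuild-the-window-and-a-set-per-character scan with the classic sliding-window distinct scan: a single start pointer that jumps past the previous occurrence of the current character, returning when the window length reaches 4.
import Mathlib
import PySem

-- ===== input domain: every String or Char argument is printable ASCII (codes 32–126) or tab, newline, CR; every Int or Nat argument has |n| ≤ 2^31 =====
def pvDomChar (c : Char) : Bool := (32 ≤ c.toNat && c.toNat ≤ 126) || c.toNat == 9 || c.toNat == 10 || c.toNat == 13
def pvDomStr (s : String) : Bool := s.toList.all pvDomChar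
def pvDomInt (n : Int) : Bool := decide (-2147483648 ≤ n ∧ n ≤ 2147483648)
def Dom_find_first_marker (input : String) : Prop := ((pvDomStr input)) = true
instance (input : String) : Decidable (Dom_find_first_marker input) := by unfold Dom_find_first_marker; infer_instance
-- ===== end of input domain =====

-- B replaces A's rebuild-a-set-per-step window with a single sliding start pointer
-- (the classic distinct-window scan); same return value, alternative algorithm.

-- ===== PORT A =====
-- A's loop: marker list of the last ≤4 chars, counter; return counter when the
-- 4-element marker has 4 distinct elements (len(set(marker)) == len(marker)).
def findGoA (rem : List Char) (marker : List Char) (counter : Int) : Int :=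
  match rem with
  | [] => 0
  | c :: rest =>
    let counter := counter + 1
    let marker := marker ++ [c]
    if marker.length == 4 then
      if (PySem.Set.ofList marker).length == marker.length then counter
      else findGoA rest (marker.tail) counter    -- marker.pop(0): value discarded, list loses its head
    else findGoA rest marker counter

def find_first_marker (input : String) : Int :=
  findGoA input.toList [] 0

-- ===== PORT B =====
-- B's loop: for i, c in enumerate(input): k = input[start:i].find(c);
-- if k != -1: start = start + k + 1; if i - start + 1 == 4: return i + 1.
def findGoB (s : List Char) (rem : List (Int × Char)) (start : Int) : Int :=
  match rem with
  | [] => 0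
  | (i, c) :: rest =>
    let k := PySem.Chars.find (PySem.List.slice s (some start) (some i)) [c]
    let start := if k != -1 then start + k + 1 else start
    if i - start + 1 == 4 then i + 1 else findGoB s rest start

def find_first_marker_alt (input : String) : Int :=
  findGoB input.toList (PySem.List.enumerate input.toList 0) 0

-- ===== PRECONDITION & SPEC =====
def Spec_find_first_marker (input : String) (out : Int) : Prop := out = find_first_marker_alt input
instance (input : String) (out : Int) : Decidable (Spec_find_first_marker input out) := by unfold Spec_find_first_marker; infer_instance

-- ===== CLAIM (what is proved, stated in full; the proofs are below) =====
def Claim_equal_find_first_marker : Prop := ∀ (input : String), Dom_find_first_marker input → Spec_find_first_marker input (find_first_marker input)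

-- ===== LEMMAS AND PROOFS =====

-- Reference recursion: both ports return i+1 at the first index i ≥ 3 whose
-- last-four window s[i-3..i] has no duplicate, else 0.
def refRun (s : List Char) : List Char → Nat → Int
  | [], _ => 0
  | _ :: rest, i =>
    if 3 ≤ i ∧ ((s.take (i+1)).drop (i-3)).Nodup then (i : Int) + 1 else refRun s rest (i+1)

-- Nodup of a contiguous window, phrased on indices of s.
theorem window_nodup_iff (s : List Char) (a b : Nat) (hb : b ≤ s.length) :
    ((s.take b).drop a).Nodup ↔ ∀ j k, a ≤ j → j < k → k < b → s[j]? ≠ s[k]? := by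
  have hlen : ((s.take b).drop a).length = b - a := by
    simp [List.length_drop, List.length_take]; omega
  have hget : ∀ q, q < b - a → ((s.take b).drop a)[q]? = s[a + q]? := by
    intro q hq
    rw [List.getElem?_drop, List.getElem?_take_of_lt (by omega)]
  rw [List.nodup_iff_getElem?_ne_getElem?]
  constructor
  · intro h j k hj hjk hkb heq
    exact h (j - a) (k - a) (by omega) (by omega)
      (by rw [hget (j - a) (by omega), hget (k - a) (by omega)]
          have h1 : a + (j - a) = j := by omega
          have h2 : a + (k - a) = k := by omega
          rw [h1, h2, heq])
  · intro h j k hjk hklen heq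
    rw [hlen] at hklen
    rw [hget j (by omega), hget k (by omega)] at heq
    exact h (a + j) (a + k) (by omega) (by omega) (by omega) heq

-- len(set(l)) == len(l) is exactly Nodup.
theorem setLen_eq_iff (l : List Char) : (PySem.Set.ofList l).length = l.length ↔ l.Nodup := by
  constructor
  · intro h
    have hperm : (PySem.Set.ofList l).Perm l.dedup :=
      (List.perm_ext_iff_of_nodup (PySem.Set.nodup_ofList l) l.nodup_dedup).mpr
        (fun a => by rw [PySem.Set.mem_ofList, List.mem_dedup])
    have hlen : l.dedup.length = l.length := by rw [← hperm.length_eq, h]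
    exact List.dedup_eq_self.mp ((List.Sublist.length_eq (List.dedup_sublist l)).mp hlen)
  · intro h
    rw [PySem.Set.ofList_eq_self_of_nodup l h]

-- Membership in the window s[st:i], phrased on indices of s.
theorem mem_window_iff (s : List Char) (st i : Nat) (hi : i ≤ s.length) (c : Char) :
    c ∈ (s.drop st).take (i - st) ↔ ∃ j, st ≤ j ∧ j < i ∧ s[j]? = some c := by
  have hlen : ((s.drop st).take (i - st)).length = min (i - st) (s.length - st) := by
    simp [List.length_take, List.length_drop]
  have hget : ∀ q, q < i - st → ((s.drop st).take (i - st))[q]? = s[st + q]? := by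
    intro q hq
    rw [List.getElem?_take_of_lt (by omega), List.getElem?_drop]
  rw [List.mem_iff_getElem?]
  constructor
  · rintro ⟨q, hq⟩
    have hqlt : q < ((s.drop st).take (i - st)).length := by
      by_contra hge
      rw [List.getElem?_eq_none_iff.mpr (by omega)] at hq
      simp at hq
    rw [hlen] at hqlt
    rw [hget q (by omega)] at hq
    exact ⟨st + q, by omega, by omega, hq⟩
  · rintro ⟨j, hj1, hj2, hj3⟩
    refine ⟨j - st, ?_⟩
    rw [hget (j - st) (by omega)]
    have h1 : st + (j - st) = j := by omega
    rw [h1, hj3]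

-- B's invariant: the window start is maximal (its predecessor char reoccurs in the window).
def winMax (s : List Char) (st i : Nat) : Prop :=
  st = 0 ∨ ∃ p, st ≤ p ∧ p < i ∧ s[p]? = s[st - 1]?

-- The window-full test of B coincides with the last-four-distinct test of A.
theorem check_iff (s : List Char) (st i : Nat) (hst : st ≤ i) (hi : i < s.length)
    (hb4 : i + 1 - st ≤ 4)
    (hW : ∀ j k, st ≤ j → j < k → k < i + 1 → s[j]? ≠ s[k]?)
    (hM : winMax s st (i + 1)) :
    (i + 1 - st = 4) ↔ (3 ≤ i ∧ ((s.take (i+1)).drop (i-3)).Nodup) := by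
  constructor
  · intro h
    refine ⟨by omega, ?_⟩
    rw [window_nodup_iff s (i-3) (i+1) (by omega)]
    have hst4 : st = i - 3 := by omega
    intro j k hj hjk hk
    exact hW j k (by omega) hjk hk
  · rintro ⟨h3, hnd⟩
    by_contra hne
    have hMu : st = 0 ∨ ∃ p, st ≤ p ∧ p < i + 1 ∧ s[p]? = s[st - 1]? := hM
    rcases hMu with h0 | ⟨p, hp1, hp2, hp3⟩
    · omega
    · rw [window_nodup_iff s (i-3) (i+1) (by omega)] at hnd
      exact hnd (st - 1) p (by omega) (by omega) (by omega) hp3.symm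

-- A's loop equals the reference recursion.
theorem goA_eq (s : List Char) : ∀ (rem : List Char) (i : Nat), rem = s.drop i → i ≤ s.length →
    findGoA rem ((s.take i).drop (i - 3)) (i : Int) = refRun s rem i := by
  intro rem
  induction rem with
  | nil => intro i _ _; rfl
  | cons c rest ih =>
    intro i h hi
    have hlt : i < s.length := by
      have := congrArg List.length h
      simp [List.length_drop] at this
      omega
    have hc : s[i]? = some c := by
      have h0 : (s.drop i)[0]? = some c := by rw [← h]; rfl
      rw [List.getElem?_drop] at h0
      simpa using h0
    have hrest : rest = s.drop (i + 1) := by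
      simpa [List.tail_drop] using congrArg List.tail h
    have hmarker : (s.take i).drop (i - 3) ++ [c] = (s.take (i+1)).drop (i - 3) := by
      rw [List.take_add_one, hc]
      rw [List.drop_append_of_le_length (by simp [List.length_take]; omega)]
      rfl
    have hmlen : ((s.take (i+1)).drop (i - 3)).length = (i + 1) - (i - 3) := by
      simp [List.length_drop, List.length_take]; omega
    show findGoA (c :: rest) _ _ = _
    rw [findGoA, refRun]
    simp only [hmarker]
    by_cases h3 : 3 ≤ i
    · have h4 : (((s.take (i+1)).drop (i - 3)).length == 4) = true := by
        simp only [beq_iff_eq]; rw [hmlen]; omega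
      rw [h4, if_pos rfl]
      by_cases hnd : ((s.take (i+1)).drop (i - 3)).Nodup
      · have hset : ((PySem.Set.ofList ((s.take (i+1)).drop (i - 3))).length
            == ((s.take (i+1)).drop (i - 3)).length) = true := by
          simp only [beq_iff_eq]
          exact (setLen_eq_iff _).mpr hnd
        rw [hset, if_pos rfl, if_pos ⟨h3, hnd⟩]
      · have hset : ((PySem.Set.ofList ((s.take (i+1)).drop (i - 3))).length
            == ((s.take (i+1)).drop (i - 3)).length) = false := by
          simp only [beq_eq_false_iff_ne, ne_eq]
          exact fun hcon => hnd ((setLen_eq_iff _).mp hcon)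
        rw [hset, if_neg (by simp), if_neg (by tauto)]
        have htail : ((s.take (i+1)).drop (i - 3)).tail = (s.take (i+1)).drop ((i+1) - 3) := by
          rw [List.tail_drop]
          have : i - 3 + 1 = (i + 1) - 3 := by omega
          rw [this]
        rw [htail]
        have := ih (i + 1) hrest (by omega)
        rw [← this]
        push_cast
        ring_nf
    · have h4 : (((s.take (i+1)).drop (i - 3)).length == 4) = false := by
        simp only [beq_eq_false_iff_ne, ne_eq]; rw [hmlen]; omega
      rw [h4, if_neg (by simp), if_neg (by omega)]
      have hdrop : (i : Nat) - 3 = (i + 1) - 3 := by omega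
      rw [hdrop]
      have := ih (i + 1) hrest (by omega)
      rw [← this]
      push_cast
      ring_nf

-- B's loop equals the reference recursion.
theorem goB_eq (s : List Char) : ∀ (rem : List Char) (i st : Nat),
    rem = s.drop i → st ≤ i → i - st ≤ 3 →
    (∀ j k, st ≤ j → j < k → k < i → s[j]? ≠ s[k]?) →
    winMax s st i →
    findGoB s (PySem.List.enumerate rem (i : Int)) (st : Int) = refRun s rem i := by
  intro rem
  induction rem with
  | nil => intro i st _ _ _ _ _; rfl
  | cons c rest ih =>
    intro i st h hsti hb hW hM
    have hlt : i < s.length := by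
      have := congrArg List.length h
      simp [List.length_drop] at this
      omega
    have hc : s[i]? = some c := by
      have h0 : (s.drop i)[0]? = some c := by rw [← h]; rfl
      rw [List.getElem?_drop] at h0
      simpa using h0
    have hrest : rest = s.drop (i + 1) := by
      simpa [List.tail_drop] using congrArg List.tail h
    rw [PySem.List.enumerate_cons, findGoB, refRun]
    rw [PySem.List.slice_natCast s st i]
    by_cases hmem : c ∈ (s.drop st).take (i - st)
    · -- duplicate found: start jumps past it
      have hinf : [c] <:+: (s.drop st).take (i - st) :=
        (List.singleton_infix_iff c _).mpr hmem
      have hk0 : 0 ≤ PySem.Chars.find ((s.drop st).take (i - st)) [c] :=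
        (PySem.Chars.find_nonneg_iff _ _).mpr hinf
      set k := PySem.Chars.find ((s.drop st).take (i - st)) [c] with hkdef
      obtain ⟨hpre, hmin⟩ := PySem.Chars.find_spec hk0
      have hwlen : ((s.drop st).take (i - st)).length = i - st := by
        simp [List.length_take, List.length_drop]; omega
      have hkl : k.toNat < i - st := by
        have h1 : 1 ≤ (((s.drop st).take (i - st)).drop k.toNat).length :=
          hpre.length_le
        simp [List.length_drop, hwlen] at h1
        omega
      have hwc : s[st + k.toNat]? = some c := by
        obtain ⟨t, ht⟩ := hpre
        have h0 : (((s.drop st).take (i - st)).drop k.toNat)[0]? = some c := by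
          rw [← ht]; rfl
        rw [List.getElem?_drop, List.getElem?_take_of_lt (by omega),
          List.getElem?_drop] at h0
        simpa using h0
      have hbr : (k != -1) = true := by
        simp only [bne_iff_ne, ne_eq]
        omega
      rw [if_pos hbr]
      -- new start index
      have hjd : st + k.toNat < i := by omega
      have hW' : ∀ j j', st + k.toNat + 1 ≤ j → j < j' → j' < i + 1 → s[j]? ≠ s[j']? := by
        intro j j' hj hjj hj' heq
        by_cases hj'i : j' < i
        · exact hW j j' (by omega) hjj hj'i heq
        · have hj'eq : j' = i := by omega
          rw [hj'eq, hc] at heq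
          exact hW (st + k.toNat) j (by omega) (by omega) (by omega) (hwc.trans heq.symm)
      have hM' : winMax s (st + k.toNat + 1) (i + 1) :=
        Or.inr ⟨i, by omega, by omega, by rw [hc]; simpa using hwc.symm⟩
      have hcast : (↑st + k + 1 : Int) = ((st + k.toNat + 1 : Nat) : Int) := by
        push_cast [Int.toNat_of_nonneg hk0]; ring
      have hiff := check_iff s (st + k.toNat + 1) i (by omega) hlt (by omega) hW' hM'
      have hchk : ¬ ((↑i - (↑st + k + 1) + 1 : Int) == 4) = true := by
        simp only [beq_iff_eq]
        rw [hcast]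
        intro hEq
        have : i + 1 - (st + k.toNat + 1) = 4 := by omega
        omega
      rw [if_neg hchk]
      rw [if_neg (by
        rw [← hiff]
        omega)]
      rw [hcast]
      have := ih (i + 1) (st + k.toNat + 1) hrest (by omega) (by omega)
        (by intro j j' hj hjj hj'; exact hW' j j' hj hjj hj') hM'
      rw [← this]
      push_cast
      ring_nf
    · -- no duplicate: start unchanged
      have hninf : ¬ [c] <:+: (s.drop st).take (i - st) := by
        intro hcon
        exact hmem ((List.singleton_infix_iff c _).mp hcon)
      have hkneg : PySem.Chars.find ((s.drop st).take (i - st)) [c] = -1 :=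
        (PySem.Chars.find_eq_neg_one_iff _ _).mpr hninf
      rw [hkneg]
      simp only [bne_self_eq_false, Bool.false_eq_true, if_false]
      have hW' : ∀ j j', st ≤ j → j < j' → j' < i + 1 → s[j]? ≠ s[j']? := by
        intro j j' hj hjj hj' heq
        by_cases hj'i : j' < i
        · exact hW j j' hj hjj hj'i heq
        · have hj'eq : j' = i := by omega
          rw [hj'eq, hc] at heq
          exact hmem ((mem_window_iff s st i (by omega) c).mpr ⟨j, hj, by omega, heq⟩)
      have hMu : st = 0 ∨ ∃ p, st ≤ p ∧ p < i ∧ s[p]? = s[st - 1]? := hM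
      have hM' : winMax s st (i + 1) := by
        rcases hMu with h0 | ⟨p, hp1, hp2, hp3⟩
        · exact Or.inl h0
        · exact Or.inr ⟨p, hp1, by omega, hp3⟩
      have hiff := check_iff s st i hsti hlt (by omega) hW' hM'
      by_cases hC : i + 1 - st = 4
      · have hchk : ((↑i - ↑st + 1 : Int) == 4) = true := by
          simp only [beq_iff_eq]; omega
        rw [if_pos hchk]
        rw [if_pos (hiff.mp hC)]
      · have hchk : ¬ ((↑i - ↑st + 1 : Int) == 4) = true := by
          simp only [beq_iff_eq]; omega
        rw [if_neg hchk]
        rw [if_neg (by rw [← hiff]; exact hC)]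
        have := ih (i + 1) st hrest (by omega) (by omega) hW' hM'
        rw [← this]
        push_cast
        ring_nf

-- ===== VERDICT (by name: the statement is the Claim_ definition above) =====
theorem find_first_marker_spec : Claim_equal_find_first_marker := by
  intro input _
  unfold Spec_find_first_marker find_first_marker find_first_marker_alt
  have hA := goA_eq input.toList input.toList 0 rfl (by omega)
  have hB := goB_eq input.toList input.toList 0 0 rfl (le_refl 0) (by omega)
    (by intro j k hj hjk hk; omega) (Or.inl rfl : winMax input.toList 0 0)
  simp only [Nat.cast_zero, List.take_zero, List.drop_nil, Nat.zero_sub] at hA hB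
  rw [hA, ← hB]
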